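-- pv_equiv track=rewrite | github.com/cpoopc/share-libs | packages/iva-logtracer/scripts/toolcall_audit.py | _effective_status
-- ===== SOURCE A (Python) =====
-- from typing import Any, Dict, Iterable, List, Tuple
--
-- def _effective_status(statuses: Iterable[str]) -> str:
--     normalized = {status for status in statuses if status}
--     if "failed" in normalized:
--         return "failed"
--     if "success" in normalized:
--         return "success"
--     if normalized:
--         return sorted(normalized)[0]
--     return "unknown"
-- ===== SOURCE B (Python) =====
-- def _effective_status(statuses):
--     items = [((0, s) if s == "failed" else (1, s) if s == "success" else (2, s))
--              for s in statuses if s]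
--     return min(items)[1] if items else "unknown"
-- ===== Notes on version B (the rewrite author's own statement) =====
-- stated objective: idiomatic
-- what changed: Replaced the set plus cascade of membership tests and sorted()[0] by a single pass that keys each truthy status with a priority (0 failed, 1 success, 2 other) and takes min(items)[1], returning 'unknown' when no items.
import Mathlib
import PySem

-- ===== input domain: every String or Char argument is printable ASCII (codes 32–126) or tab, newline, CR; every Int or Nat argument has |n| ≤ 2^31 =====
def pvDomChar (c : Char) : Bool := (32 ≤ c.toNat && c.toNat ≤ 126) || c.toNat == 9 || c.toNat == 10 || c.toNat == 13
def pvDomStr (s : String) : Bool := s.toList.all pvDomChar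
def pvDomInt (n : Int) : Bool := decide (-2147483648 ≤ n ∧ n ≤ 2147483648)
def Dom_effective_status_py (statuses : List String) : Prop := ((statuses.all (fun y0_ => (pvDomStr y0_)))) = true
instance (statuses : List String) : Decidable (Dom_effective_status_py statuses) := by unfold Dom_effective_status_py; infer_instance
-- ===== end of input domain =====

-- B replaces A's set + membership-cascade + sorted()[0] by one priority-keyed min pass (idiomatic).


-- ===== PORT A =====
def effective_status_py (statuses : List String) : String :=
  let normalized := PySem.Set.ofList (statuses.filter (fun s => s != ""))
  if "failed" ∈ normalized then "failed"
  else if "success" ∈ normalized then "success"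
  else if normalized ≠ [] then
    -- sorted(normalized)[0]: the guard makes the list nonempty, so headD's default is unreachable
    (PySem.List.sorted normalized (fun x => x) false).headD "unknown"
  else "unknown"

-- ===== PORT B =====
-- the keying conditional expression of Source B's comprehension, named for the proofs
def pvKeyFn : String → Nat × String :=
  fun s => if s == "failed" then ((0 : Nat), s) else if s == "success" then ((1 : Nat), s) else ((2 : Nat), s)

def effective_status_py_alt (statuses : List String) : String :=
  let items := (statuses.filter (fun s => s != "")).map pvKeyFn
  match PySem.List.min2? items (fun p => p.1) (fun p => p.2) with
  | some m => m.2
  | none => "unknown"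

-- ===== PRECONDITION & SPEC =====
def Spec_effective_status_py (statuses : List String) (out : String) : Prop := out = effective_status_py_alt statuses
instance (statuses : List String) (out : String) : Decidable (Spec_effective_status_py statuses out) := by unfold Spec_effective_status_py; infer_instance

-- ===== CLAIM (what is proved, stated in full; the proofs are below) =====
def Claim_equal_effective_status_py : Prop := ∀ (statuses : List String), Dom_effective_status_py statuses → Spec_effective_status_py statuses (effective_status_py statuses)

-- ===== LEMMAS AND PROOFS =====

-- the fold step of min2? specialized to our keys
def pvF : Option (Nat × String) → (Nat × String) → Option (Nat × String) :=
  fun acc x =>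
    match acc with
    | none => some x
    | some m => if (decide (x.1 < m.1) || !decide (m.1 < x.1) && decide (x.2 < m.2)) = true then some x else some m

lemma pvMin2_eq (xs : List (Nat × String)) :
    PySem.List.min2? xs (fun p => p.1) (fun p => p.2) = xs.foldl pvF none := by
  unfold PySem.List.min2?
  congr 1
  funext acc x
  cases acc <;> rfl

-- "not lexicographically greater": what the running minimum satisfies
def pvLexle (a b : Nat × String) : Prop := a.1 < b.1 ∨ (a.1 = b.1 ∧ a.2 ≤ b.2)

lemma pvLexle_refl (a : Nat × String) : pvLexle a a := Or.inr ⟨rfl, le_refl _⟩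

lemma pvLexle_trans {a b c : Nat × String} (h1 : pvLexle a b) (h2 : pvLexle b c) : pvLexle a c := by
  rcases h1 with h1 | ⟨h1, h1'⟩ <;> rcases h2 with h2 | ⟨h2, h2'⟩
  · exact Or.inl (h1.trans h2)
  · exact Or.inl (h2 ▸ h1)
  · exact Or.inl (h1 ▸ h2)
  · exact Or.inr ⟨h1.trans h2, h1'.trans h2'⟩

lemma pvStep (m0 x : Nat × String) :
    ∃ m1, pvF (some m0) x = some m1 ∧ (m1 = m0 ∨ m1 = x) ∧ pvLexle m1 m0 ∧ pvLexle m1 x := by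
  have hred : pvF (some m0) x =
      if (decide (x.1 < m0.1) || !decide (m0.1 < x.1) && decide (x.2 < m0.2)) = true
      then some x else some m0 := rfl
  rw [hred]
  split
  · rename_i h
    simp only [Bool.or_eq_true, Bool.and_eq_true, decide_eq_true_eq, Bool.not_eq_true',
      decide_eq_false_iff_not] at h
    refine ⟨x, rfl, Or.inr rfl, ?_, pvLexle_refl x⟩
    unfold pvLexle
    rcases h with h | ⟨h1, h2⟩
    · exact Or.inl h
    · rcases Nat.lt_or_ge x.1 m0.1 with hlt | hge
      · exact Or.inl hlt
      · exact Or.inr ⟨Nat.le_antisymm (Nat.not_lt.mp h1) hge, le_of_lt h2⟩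
  · rename_i h
    simp only [Bool.or_eq_true, Bool.and_eq_true, decide_eq_true_eq, Bool.not_eq_true',
      decide_eq_false_iff_not] at h
    push Not at h
    obtain ⟨h1, h2⟩ := h
    refine ⟨m0, rfl, Or.inl rfl, pvLexle_refl m0, ?_⟩
    unfold pvLexle
    rcases Nat.lt_or_ge m0.1 x.1 with hlt | hge
    · exact Or.inl hlt
    · exact Or.inr ⟨Nat.le_antisymm h1 hge, h2 hge⟩

lemma pvFoldl_some (xs : List (Nat × String)) :
    ∀ m0, ∃ m, xs.foldl pvF (some m0) = some m ∧ (m = m0 ∨ m ∈ xs) ∧ pvLexle m m0 ∧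
      ∀ y ∈ xs, pvLexle m y := by
  induction xs with
  | nil => exact fun m0 => ⟨m0, rfl, Or.inl rfl, pvLexle_refl m0, by simp⟩
  | cons x t ih =>
    intro m0
    obtain ⟨m1, hstep, hmem1, hle0, hlex⟩ := pvStep m0 x
    obtain ⟨m, hfold, hmem, hle1, hall⟩ := ih m1
    refine ⟨m, by simpa [hstep] using hfold, ?_, pvLexle_trans hle1 hle0, ?_⟩
    · rcases hmem with h | h
      · rcases hmem1 with h1 | h1
        · exact Or.inl (h ▸ h1)
        · exact Or.inr (by simp [h, h1])
      · exact Or.inr (List.mem_cons_of_mem _ h)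
    · intro y hy
      rcases List.mem_cons.mp hy with h | h
      · exact h ▸ pvLexle_trans hle1 hlex
      · exact hall y h

lemma pvMin_cons (x : Nat × String) (t : List (Nat × String)) :
    ∃ m, (x :: t).foldl pvF none = some m ∧ m ∈ x :: t ∧ ∀ y ∈ x :: t, pvLexle m y := by
  obtain ⟨m, hfold, hmem, hle, hall⟩ := pvFoldl_some t x
  refine ⟨m, hfold, ?_, ?_⟩
  · rcases hmem with h | h
    · exact h ▸ List.mem_cons_self
    · exact List.mem_cons_of_mem _ h
  · intro y hy
    rcases List.mem_cons.mp hy with h | h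
    · exact h ▸ hle
    · exact hall y h

-- shape of pvKeyFn's output
lemma pvKeyFn_cases (s : String) :
    (s = "failed" ∧ pvKeyFn s = (0, s)) ∨ (s ≠ "failed" ∧ s = "success" ∧ pvKeyFn s = (1, s)) ∨
      (s ≠ "failed" ∧ s ≠ "success" ∧ pvKeyFn s = (2, s)) := by
  unfold pvKeyFn
  by_cases h1 : s = "failed"
  · exact Or.inl ⟨h1, by simp [h1]⟩
  · by_cases h2 : s = "success"
    · exact Or.inr (Or.inl ⟨h1, h2, by simp [h2]⟩)
    · exact Or.inr (Or.inr ⟨h1, h2, by simp [h1, h2]⟩)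

-- ===== VERDICT (by name: the statement is the Claim_ definition above) =====
theorem effective_status_py_spec : Claim_equal_effective_status_py := by
  intro statuses _
  unfold Spec_effective_status_py effective_status_py effective_status_py_alt
  simp only []
  set L := statuses.filter (fun s => s != "") with hLdef
  rw [pvMin2_eq]
  by_cases hemp : L = []
  · simp [hemp, PySem.Set.ofList]
  · obtain ⟨x0, t0, hitems⟩ : ∃ x t, L.map pvKeyFn = x :: t := by
      cases hLc : L with
      | nil => exact absurd hLc hemp
      | cons a l => exact ⟨pvKeyFn a, l.map pvKeyFn, by simp⟩
    rw [hitems]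
    obtain ⟨m, hfold, hmem, hall⟩ := pvMin_cons x0 t0
    rw [hfold]
    have hmem' : m ∈ L.map pvKeyFn := hitems ▸ hmem
    obtain ⟨s, hsL, hsm⟩ := List.mem_map.mp hmem'
    have hall' : ∀ y ∈ L.map pvKeyFn, pvLexle m y := fun y hy => hall y (hitems ▸ hy)
    by_cases hf : "failed" ∈ L
    · rw [if_pos ((PySem.Set.mem_ofList _ _).mpr hf)]
      have hkmem : pvKeyFn "failed" ∈ L.map pvKeyFn := List.mem_map_of_mem hf
      have hk : pvKeyFn "failed" = ((0 : Nat), "failed") := by simp [pvKeyFn]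
      have hlex := hall' _ hkmem
      rw [hk] at hlex
      rcases hlex with h | ⟨h, _⟩
      · exact absurd h (Nat.not_lt_zero _)
      · rcases pvKeyFn_cases s with ⟨hs1, hs2⟩ | ⟨_, _, hs2⟩ | ⟨_, _, hs2⟩
        · rw [← hsm, hs2, hs1]
        · rw [← hsm, hs2] at h; simp at h
        · rw [← hsm, hs2] at h; simp at h
    · rw [if_neg (fun h => hf ((PySem.Set.mem_ofList _ _).mp h))]
      by_cases hs : "success" ∈ L
      · rw [if_pos ((PySem.Set.mem_ofList _ _).mpr hs)]
        have hkmem : pvKeyFn "success" ∈ L.map pvKeyFn := List.mem_map_of_mem hs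
        have hk : pvKeyFn "success" = ((1 : Nat), "success") := by simp [pvKeyFn]
        have hlex := hall' _ hkmem
        rw [hk] at hlex
        rcases pvKeyFn_cases s with ⟨hs1, _⟩ | ⟨_, hs1, hs2⟩ | ⟨_, _, hs2⟩
        · exact absurd (hs1 ▸ hsL) hf
        · rw [← hsm, hs2, hs1]
        · rw [← hsm, hs2] at hlex
          rcases hlex with h | ⟨h, _⟩ <;> simp at h
      · rw [if_neg (fun h => hs ((PySem.Set.mem_ofList _ _).mp h))]
        have hN : PySem.Set.ofList L ≠ [] := by
          obtain ⟨a, ha⟩ := List.exists_mem_of_ne_nil _ hemp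
          exact List.ne_nil_of_mem ((PySem.Set.mem_ofList _ _).mpr ha)
        rw [if_pos hN]
        obtain ⟨h0, tS, hSL⟩ : ∃ h0 tS,
            PySem.List.sorted (PySem.Set.ofList L) (fun x => x) false = h0 :: tS := by
          cases hc : PySem.List.sorted (PySem.Set.ofList L) (fun x => x) false with
          | nil => exact absurd ((PySem.List.sorted_eq_nil_iff _ _ _).mp hc) hN
          | cons a l => exact ⟨a, l, rfl⟩
        rw [hSL]
        simp only [List.headD_cons]
        have hh : h0 ∈ L := (PySem.Set.mem_ofList _ _).mp
          ((PySem.List.mem_sorted _ _ _ _).mp (hSL ▸ List.mem_cons_self))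
        have hhmin : ∀ y ∈ L, h0 ≤ y := fun y hy =>
          PySem.List.key_head_sorted_le _ _ hSL y ((PySem.Set.mem_ofList _ _).mpr hy)
        have hhf : h0 ≠ "failed" := fun h => hf (h ▸ hh)
        have hhs : h0 ≠ "success" := fun h => hs (h ▸ hh)
        have hsf : s ≠ "failed" := fun h => hf (h ▸ hsL)
        have hss : s ≠ "success" := fun h => hs (h ▸ hsL)
        have hm2 : m = ((2 : Nat), s) := by
          rcases pvKeyFn_cases s with ⟨h1, _⟩ | ⟨_, h1, _⟩ | ⟨_, _, h2⟩
          · exact absurd h1 hsf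
          · exact absurd h1 hss
          · rw [← hsm, h2]
        have hkh : pvKeyFn h0 = ((2 : Nat), h0) := by
          rcases pvKeyFn_cases h0 with ⟨h1, _⟩ | ⟨_, h1, _⟩ | ⟨_, _, h2⟩
          · exact absurd h1 hhf
          · exact absurd h1 hhs
          · exact h2
        have hlex := hall' _ (List.mem_map_of_mem (f := pvKeyFn) hh)
        rw [hkh, hm2] at hlex
        have hsh : s ≤ h0 := by
          rcases hlex with h | ⟨_, h⟩
          · simp at h
          · exact h
        have : s = h0 := le_antisymm hsh (hhmin s hsL)
        rw [hm2]
        exact this.symm
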